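-- pv_equiv track=rewrite | github.com/sstollenwerk/advent-code-2017 | src/day13.py | expanded
-- ===== SOURCE A (Python) =====
-- from copy import deepcopy
--
-- def expanded(r: dict[int, set[int]]) -> dict[int, set[int]]:
--     reversed = deepcopy(r)
--     for k1, v1 in reversed.items():
--         for k2, v2 in reversed.items():
--             if not k2 % k1:
--                 for i in range(k2):
--                     if i % k1 in v1:
--                         v2.add(i)
--     return reversed
-- ===== SOURCE B (Python) =====
-- def expanded(r: dict[int, set[int]]) -> dict[int, set[int]]:
--     res = {k: set(v) for k, v in r.items()}
--     for k1, v1 in res.items():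
--         for k2, v2 in res.items():
--             if k2 % k1 == 0:
--                 # which i qualify is periodic in i with period |k1|:
--                 # compute one period's pattern, then tile it across range(k2)
--                 p = abs(k1)
--                 pattern = [c for c in range(p) if c % k1 in v1]
--                 for base in range(0, k2, p):
--                     for c in pattern:
--                         v2.add(base + c)
--     return res
-- ===== Notes on version B (the rewrite author's own statement) =====
-- stated objective: alternative
-- what changed: The acceptance test i % k1 in v1 is periodic in i with period |k1|, so instead of scanning every i in range(k2) B computes one period's pattern of qualifying residues and tiles it across range(0, k2, |k1|); Pre_ excludes a key 0 (A raises ZeroDivisionError) and association lists with duplicate keys or duplicate set elements, which represent no Python dict[int, set[int]].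
import Mathlib
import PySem

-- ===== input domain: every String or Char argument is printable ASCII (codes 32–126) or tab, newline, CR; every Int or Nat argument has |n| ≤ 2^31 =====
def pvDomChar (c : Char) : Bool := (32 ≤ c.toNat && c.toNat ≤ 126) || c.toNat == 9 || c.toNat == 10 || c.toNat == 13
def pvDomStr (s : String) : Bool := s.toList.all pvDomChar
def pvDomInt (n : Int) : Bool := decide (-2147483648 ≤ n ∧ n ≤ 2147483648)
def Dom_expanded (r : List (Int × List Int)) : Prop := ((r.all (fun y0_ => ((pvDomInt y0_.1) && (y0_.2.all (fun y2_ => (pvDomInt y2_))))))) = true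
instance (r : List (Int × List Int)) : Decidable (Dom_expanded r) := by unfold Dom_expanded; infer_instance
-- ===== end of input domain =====

-- B exploits that the acceptance test 'i % k1 in v1' is periodic in i with period |k1|:
-- it computes one period's pattern of qualifying residues and tiles it across range(0, k2, |k1|),
-- instead of scanning every i in range(k2).

-- ===== PORT A =====
-- loop body of 'for i in range(k2): if i % k1 in v1: v2.add(i)' (v1/v2 read live from the dict)
def aStep (k1 k2 : Int) (st : PySem.Dict Int (List Int)) (i : Int) : PySem.Dict Int (List Int) :=
  if PySem.Int.mod i k1 ∈ st.getD k1 [] then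
    st.modify k2 [] (fun v2 => PySem.Set.add v2 i)
  else st

-- body of the inner 'for k2, v2 in reversed.items():'
def aPass (k1 k2 : Int) (st : PySem.Dict Int (List Int)) : PySem.Dict Int (List Int) :=
  if PySem.Int.mod k2 k1 = 0 then
    (PySem.List.pyRange 0 k2 1).foldl (aStep k1 k2) st
  else st

def expanded (r : List (Int × List Int)) : List (Int × List Int) :=
  let d0 : PySem.Dict Int (List Int) := PySem.Dict.mk r   -- reversed = deepcopy(r)
  (d0.keys.foldl (fun st k1 =>
    d0.keys.foldl (fun st k2 => aPass k1 k2 st) st) d0).items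

-- ===== PORT B =====
-- body of the inner 'for k2, v2 in res.items():' of Source B
def bPass (k1 k2 : Int) (st : PySem.Dict Int (List Int)) : PySem.Dict Int (List Int) :=
  if PySem.Int.mod k2 k1 = 0 then
    let p := |k1|
    let pattern := (PySem.List.pyRange 0 p 1).filter
      (fun c => decide (PySem.Int.mod c k1 ∈ st.getD k1 []))
    (PySem.List.pyRange 0 k2 p).foldl (fun st base =>
      pattern.foldl (fun st c => st.modify k2 [] (fun v2 => PySem.Set.add v2 (base + c))) st) st
  else st

def expanded_alt (r : List (Int × List Int)) : List (Int × List Int) :=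
  let d0 : PySem.Dict Int (List Int) :=
    PySem.Dict.mk (r.map (fun p => (p.1, PySem.Set.ofList p.2)))   -- {k: set(v) …}
  (d0.keys.foldl (fun st k1 =>
    d0.keys.foldl (fun st k2 => bPass k1 k2 st) st) d0).items

-- ===== PRECONDITION & SPEC =====
-- Pre_ excludes assoc lists with a key 0 (there Python A raises ZeroDivisionError at 'k2 % k1',
-- and B raises too), and assoc lists that are not a valid dict-of-sets representation
-- (duplicate keys or duplicate elements inside a value list cannot arise from a Python
-- dict[int, set[int]], so they represent no input A was ever run on).
def Pre_expanded (r : List (Int × List Int)) : Prop :=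
  (r.map Prod.fst).Nodup ∧ ∀ p ∈ r, p.1 ≠ 0 ∧ p.2.Nodup
instance (r : List (Int × List Int)) : Decidable (Pre_expanded r) := by
  unfold Pre_expanded; infer_instance

def pvWitness_expanded : (List (Int × List Int)) := [(2, [0]), (4, [1, 3])]

def Spec_expanded (r : List (Int × List Int)) (out : List (Int × List Int)) : Prop := out = expanded_alt r
instance (r : List (Int × List Int)) (out : List (Int × List Int)) : Decidable (Spec_expanded r out) := by unfold Spec_expanded; infer_instance

-- ===== CLAIM (what is proved, stated in full; the proofs are below) =====
def Claim_equal_expanded : Prop := ∀ (r : List (Int × List Int)), Dom_expanded r → Pre_expanded r → Spec_expanded r (expanded r)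

-- ===== LEMMAS AND PROOFS =====

-- b ∣ m - (m % b), from the division identity
theorem pv_mod_sub_dvd (m b : Int) : b ∣ (m - PySem.Int.mod m b) :=
  ⟨PySem.Int.floordiv m b, by
    have h := PySem.Int.floordiv_mul_add_mod m b
    linarith [mul_comm b (PySem.Int.floordiv m b)]⟩

-- characterisation of Python's % : its value is THE representative in the divisor's window
theorem pv_mod_char {b : Int} (hb : b ≠ 0) {x m : Int} :
    PySem.Int.mod x b = m ↔
      (((0 < b ∧ 0 ≤ m ∧ m < b) ∨ (b < 0 ∧ b < m ∧ m ≤ 0)) ∧ b ∣ (x - m)) := by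
  constructor
  · rintro rfl
    refine ⟨?_, pv_mod_sub_dvd x b⟩
    rcases lt_or_gt_of_ne hb with h | h
    · exact Or.inr ⟨h, (PySem.Int.mod_neg_bounds x h).1, (PySem.Int.mod_neg_bounds x h).2⟩
    · exact Or.inl ⟨h, PySem.Int.mod_nonneg x h, PySem.Int.mod_lt x h⟩
  · rintro ⟨hwin, hdvd⟩
    have hdvd' : b ∣ (PySem.Int.mod x b - m) := by
      have : PySem.Int.mod x b - m = (x - m) - (x - PySem.Int.mod x b) := by ring
      rw [this]; exact dvd_sub hdvd (pv_mod_sub_dvd x b)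
    have habs : |b| ∣ (PySem.Int.mod x b - m) := (abs_dvd b _).mpr hdvd'
    have hlt : |PySem.Int.mod x b - m| < |b| := by
      rcases hwin with ⟨hbp, hm1, hm2⟩ | ⟨hbn, hm1, hm2⟩
      · have e1 := PySem.Int.mod_nonneg x hbp
        have e2 := PySem.Int.mod_lt x hbp
        rw [abs_of_pos hbp, abs_lt]; omega
      · have e := PySem.Int.mod_neg_bounds x hbn
        rw [abs_of_neg hbn, abs_lt]; omega
    have := Int.eq_zero_of_abs_lt_dvd habs hlt
    omega

-- Python's % is invariant under shifting by a multiple of the divisor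
theorem pv_mod_add_left {k1 : Int} (h1 : k1 ≠ 0) {a : Int} (ha : k1 ∣ a) (c : Int) :
    PySem.Int.mod (a + c) k1 = PySem.Int.mod c k1 := by
  obtain ⟨hwin, hdvd⟩ := (pv_mod_char h1).mp (rfl : PySem.Int.mod c k1 = PySem.Int.mod c k1)
  refine (pv_mod_char h1).mpr ⟨hwin, ?_⟩
  have : a + c - PySem.Int.mod c k1 = a + (c - PySem.Int.mod c k1) := by ring
  rw [this]; exact dvd_add ha hdvd

-- one tile: the accepted i in a window [a, a + |k1|) are the pattern shifted by a
theorem pv_block (k1 : Int) (h1 : k1 ≠ 0) (v1 : List Int) (a : Int) (ha : k1 ∣ a) :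
    (PySem.List.pyRange a (a + |k1|) 1).filter (fun i => decide (PySem.Int.mod i k1 ∈ v1))
      = ((PySem.List.pyRange 0 |k1| 1).filter
          (fun c => decide (PySem.Int.mod c k1 ∈ v1))).map (fun c => a + c) := by
  rw [PySem.List.pyRange_one a (a + |k1|), PySem.List.pyRange_one 0 |k1|,
    List.filter_map, List.filter_map, List.map_map]
  have e1 : a + |k1| - a = |k1| := by ring
  have e2 : |k1| - (0:Int) = |k1| := by ring
  rw [e1, e2]
  have hmap : ((fun c => a + c) ∘ fun k : Nat => (0:Int) + (k:Int)) = (fun k : Nat => a + (k:Int)) := by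
    funext k; simp
  rw [hmap]
  congr 1
  apply List.filter_congr
  intro k _
  simp [Function.comp, pv_mod_add_left h1 ha]

-- N tiles laid end to end are the filtered scan of [0, |k1|·N)
theorem pv_blocks (k1 : Int) (h1 : k1 ≠ 0) (v1 : List Int) : ∀ N : Nat,
    (List.range N).flatMap (fun (j : Nat) =>
        ((PySem.List.pyRange 0 |k1| 1).filter
          (fun c => decide (PySem.Int.mod c k1 ∈ v1))).map (fun c => |k1| * (j:Int) + c))
      = (PySem.List.pyRange 0 (|k1| * (N:Int)) 1).filter
          (fun i => decide (PySem.Int.mod i k1 ∈ v1)) := by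
  intro N
  induction N with
  | zero => simp [PySem.List.pyRange_one_eq_nil]
  | succ N ih =>
    have hp : (0:Int) < |k1| := abs_pos.mpr h1
    have hcast : |k1| * ((N:Nat) + 1 : Int) = |k1| * (N:Int) + |k1| := by ring
    have hsplit : PySem.List.pyRange 0 (|k1| * (N:Int) + |k1|) 1
        = PySem.List.pyRange 0 (|k1| * (N:Int)) 1
          ++ PySem.List.pyRange (|k1| * (N:Int)) (|k1| * (N:Int) + |k1|) 1 :=
      PySem.List.pyRange_one_append 0 (|k1| * (N:Int)) (|k1| * (N:Int) + |k1|)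
        (by positivity) (by linarith)
    rw [List.range_succ, List.flatMap_append, ih]
    push_cast
    rw [hcast, hsplit, List.filter_append]
    congr 1
    rw [pv_block k1 h1 v1 (|k1| * (N:Int))
      (Dvd.dvd.mul_right ((dvd_abs k1 k1).mpr dvd_rfl) (N:Int))]
    simp

-- B's tiled enumeration IS A's filtered scan of range(k2)
theorem pv_tile (k1 k2 : Int) (h1 : k1 ≠ 0) (hm : PySem.Int.mod k2 k1 = 0) (v1 : List Int) :
    (PySem.List.pyRange 0 k2 |k1|).flatMap (fun base =>
        ((PySem.List.pyRange 0 |k1| 1).filter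
          (fun c => decide (PySem.Int.mod c k1 ∈ v1))).map (fun c => base + c))
      = (PySem.List.pyRange 0 k2 1).filter (fun i => decide (PySem.Int.mod i k1 ∈ v1)) := by
  have hp : (0:Int) < |k1| := abs_pos.mpr h1
  by_cases hk2 : k2 ≤ 0
  · rw [PySem.List.pyRange_of_pos 0 k2 hp, if_neg (by omega), PySem.List.pyRange_one_eq_nil hk2]
    simp
  · replace hk2 : 0 < k2 := by omega
    have hdvd : |k1| ∣ k2 := (abs_dvd k1 k2).mpr ((PySem.Int.mod_eq_zero_iff_dvd k2 k1).mp hm)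
    obtain ⟨t, ht⟩ := hdvd
    have htpos : 0 < t := by nlinarith
    have htN : ((t.toNat : Nat) : Int) = t := Int.toNat_of_nonneg (le_of_lt htpos)
    have hbases : PySem.List.pyRange 0 k2 |k1|
        = (List.range t.toNat).map (fun k : Nat => (0:Int) + |k1| * (k:Int)) := by
      rw [PySem.List.pyRange_of_pos 0 k2 hp, if_pos (by omega)]
      congr 2
      have e : k2 - 0 + |k1| - 1 = (|k1| - 1) + |k1| * t := by rw [ht]; ring
      rw [e, Int.add_mul_ediv_left (|k1| - 1) t (ne_of_gt hp),
        Int.ediv_eq_zero_of_lt (by omega) (by omega)]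
      omega
    rw [hbases, List.flatMap_map]
    simp only [zero_add]
    have hb := pv_blocks k1 h1 v1 t.toNat
    rw [htN, ← ht] at hb
    exact hb

-- ---- dict-level facts ----

theorem pv_insert_self (d : PySem.Dict Int (List Int)) (hk : d.keys.Nodup)
    {k : Int} {v : List Int} (hget : d.get? k = some v) : d.insert k v = d := by
  have hcont : d.contains k = true := by
    rw [PySem.Dict.contains_eq_isSome_get?, hget]; rfl
  apply PySem.Dict.ext
  rw [PySem.Dict.items_insert_of_contains d v hcont]
  conv_rhs => rw [← List.map_id d.items]
  apply List.map_congr_left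
  intro p hp
  by_cases h : p.1 = k
  · have hm : (p.1, p.2) ∈ d.items := by simpa using hp
    have h2 : d.get? p.1 = some p.2 := PySem.Dict.get?_of_mem_items d hm hk
    rw [h, hget] at h2
    have h3 : v = p.2 := Option.some_inj.mp h2
    rw [if_pos (by simpa using h), ← h, h3]; rfl
  · simp [h]

theorem pv_mem_getD_get? {st : PySem.Dict Int (List Int)} {k i : Int}
    (h : i ∈ st.getD k ([] : List Int)) : st.get? k = some (st.getD k []) := by
  rw [PySem.Dict.getD_eq_get?_getD] at *
  cases hh : st.get? k with
  | none => rw [hh] at h; simp at h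
  | some v => rfl

theorem pv_addStep_id {st : PySem.Dict Int (List Int)} (hk : st.keys.Nodup)
    {k2 i : Int} (hmem : i ∈ st.getD k2 ([] : List Int)) :
    st.modify k2 [] (fun v => PySem.Set.add v i) = st := by
  have hget := pv_mem_getD_get? hmem
  show st.insert k2 (PySem.Set.add (st.getD k2 []) i) = st
  rw [PySem.Set.add_of_mem hmem]
  exact pv_insert_self st hk hget

theorem pv_keys_modify {st : PySem.Dict Int (List Int)} (hk : st.keys.Nodup)
    (k2 i : Int) : (st.modify k2 [] (fun v => PySem.Set.add v i)).keys.Nodup := by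
  show (st.insert k2 (PySem.Set.add (st.getD k2 []) i)).keys.Nodup
  exact PySem.Dict.nodup_keys_insert _ _ _ hk

theorem pv_keys_aStep {st : PySem.Dict Int (List Int)} (hk : st.keys.Nodup) (k1 k2 i : Int) :
    (aStep k1 k2 st i).keys.Nodup := by
  unfold aStep
  split
  · exact pv_keys_modify hk k2 i
  · exact hk

theorem pv_keys_foldl {f : PySem.Dict Int (List Int) → Int → PySem.Dict Int (List Int)}
    (hf : ∀ s i, s.keys.Nodup → (f s i).keys.Nodup) :
    ∀ (l : List Int) (st : PySem.Dict Int (List Int)), st.keys.Nodup → (l.foldl f st).keys.Nodup := by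
  intro l
  induction l with
  | nil => intro st h; exact h
  | cons i t ih => intro st h; exact ih _ (hf st i h)

theorem pv_keys_aPass {st : PySem.Dict Int (List Int)} (hk : st.keys.Nodup) (k1 k2 : Int) :
    (aPass k1 k2 st).keys.Nodup := by
  unfold aPass
  split
  · exact pv_keys_foldl (fun s i h => pv_keys_aStep h k1 k2 i) _ st hk
  · exact hk

-- A's live reads of v1 = reads of the snapshot taken at the start of the pass
theorem pv_aFold_fix (k1 k2 : Int) (v1 : List Int) :
    ∀ (l : List Int) (st : PySem.Dict Int (List Int)), st.keys.Nodup →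
      st.getD k1 [] = v1 → (∀ i ∈ l, 0 ≤ i ∧ i < k2) →
      l.foldl (aStep k1 k2) st =
        l.foldl (fun s i => if PySem.Int.mod i k1 ∈ v1 then
            s.modify k2 [] (fun v => PySem.Set.add v i) else s) st := by
  intro l
  induction l with
  | nil => intro st _ _ _; rfl
  | cons i t ih =>
    intro st hk hv1 hbnd
    have hstep : aStep k1 k2 st i =
        (if PySem.Int.mod i k1 ∈ v1 then
          st.modify k2 [] (fun v => PySem.Set.add v i) else st) := by
      unfold aStep; rw [hv1]
    rw [List.foldl_cons, List.foldl_cons, hstep]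
    by_cases hc : PySem.Int.mod i k1 ∈ v1
    · rw [if_pos hc]
      by_cases hkk : k1 = k2
      · -- writing to the very set being read: the added element is already present
        have hb := hbnd i (by simp)
        have hk1pos : 0 < k1 := by omega
        have hmodi : PySem.Int.mod i k1 = i := by
          rw [PySem.Int.mod_eq_emod_of_pos hk1pos]
          exact Int.emod_eq_of_lt hb.1 (by omega)
        have hmem : i ∈ st.getD k2 ([] : List Int) := by
          rw [← hkk, hv1]; rw [hmodi] at hc; exact hc
        rw [pv_addStep_id hk hmem]
        exact ih st hk hv1 (fun j hj => hbnd j (by simp [hj]))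
      · exact ih _ (pv_keys_modify hk k2 i)
          (by rw [PySem.Dict.getD_modify_of_ne st [] _ hkk, hv1])
          (fun j hj => hbnd j (by simp [hj]))
    · rw [if_neg hc]
      exact ih st hk hv1 (fun j hj => hbnd j (by simp [hj]))

theorem pv_pass_eq (k1 k2 : Int) (h1 : k1 ≠ 0) (st : PySem.Dict Int (List Int))
    (hk : st.keys.Nodup) : aPass k1 k2 st = bPass k1 k2 st := by
  by_cases hm : PySem.Int.mod k2 k1 = 0
  · have ha : aPass k1 k2 st = (PySem.List.pyRange 0 k2 1).foldl (aStep k1 k2) st := by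
      unfold aPass; rw [if_pos hm]
    have hb : bPass k1 k2 st = List.foldl
        (fun s i => s.modify k2 [] (fun v2 => PySem.Set.add v2 i)) st
        ((PySem.List.pyRange 0 k2 |k1|).flatMap (fun base =>
          ((PySem.List.pyRange 0 |k1| 1).filter
            (fun c => decide (PySem.Int.mod c k1 ∈ st.getD k1 []))).map (fun c => base + c))) := by
      simp only [bPass, if_pos hm, List.foldl_flatMap, List.foldl_map]
    rw [ha, hb, pv_tile k1 k2 h1 hm (st.getD k1 []),
      pv_aFold_fix k1 k2 (st.getD k1 []) _ st hk rfl
        (fun i hi => by rw [PySem.List.mem_pyRange_one] at hi; exact hi),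
      PySem.List.foldl_ite_eq_foldl_filter (p := fun i => PySem.Int.mod i k1 ∈ st.getD k1 [])
        (fun s i => s.modify k2 [] (fun v => PySem.Set.add v i)) _ st]
  · unfold aPass bPass; rw [if_neg hm, if_neg hm]

theorem pv_inner_eq (ks : List Int) (k1 : Int) (h1 : k1 ≠ 0) :
    ∀ (st : PySem.Dict Int (List Int)), st.keys.Nodup →
      ks.foldl (fun st k2 => aPass k1 k2 st) st = ks.foldl (fun st k2 => bPass k1 k2 st) st := by
  induction ks with
  | nil => intro st _; rfl
  | cons k t ih =>
    intro st hk
    rw [List.foldl_cons, List.foldl_cons, ← pv_pass_eq k1 k h1 st hk]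
    exact ih _ (pv_keys_aPass hk k1 k)

theorem pv_outer_eq (ks : List Int) :
    ∀ (l : List Int) (st : PySem.Dict Int (List Int)), (∀ k ∈ l, k ≠ 0) → st.keys.Nodup →
      l.foldl (fun st k1 => ks.foldl (fun st k2 => aPass k1 k2 st) st) st =
      l.foldl (fun st k1 => ks.foldl (fun st k2 => bPass k1 k2 st) st) st := by
  intro l
  induction l with
  | nil => intro st _ _; rfl
  | cons k t ih =>
    intro st hl hk
    rw [List.foldl_cons, List.foldl_cons,
      ← pv_inner_eq ks k (hl k (by simp)) st hk]
    exact ih _ (fun j hj => hl j (by simp [hj]))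
      (pv_keys_foldl (fun s i h => pv_keys_aPass h k i) ks st hk)

-- ===== VERDICT (by name: the statement is the Claim_ definition above) =====
theorem expanded_spec : Claim_equal_expanded := by
  intro r _ hpre
  obtain ⟨hkeys, hvals⟩ := hpre
  simp only [Spec_expanded, expanded, expanded_alt]
  have hmap : r.map (fun p => (p.1, PySem.Set.ofList p.2)) = r := by
    conv_rhs => rw [← List.map_id r]
    apply List.map_congr_left
    intro p hp
    have := PySem.Set.ofList_eq_self_of_nodup p.2 (hvals p hp).2
    simp [this]
  rw [hmap]
  have hk : (PySem.Dict.mk r).keys.Nodup := by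
    rw [PySem.Dict.keys_mk]; exact hkeys
  have hks : ∀ k ∈ (PySem.Dict.mk r).keys, k ≠ 0 := by
    intro k hk
    rw [PySem.Dict.keys_mk] at hk
    obtain ⟨p, hp, rfl⟩ := List.mem_map.mp hk
    exact (hvals p hp).1
  exact congrArg PySem.Dict.items
    (pv_outer_eq (PySem.Dict.mk r).keys (PySem.Dict.mk r).keys (PySem.Dict.mk r) hks hk)
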